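-- pv_equiv track=rewrite | github.com/Grey1991/COMP9021-Python | Quiz/quiz1/quiz1.py | longestvaluelist
-- ===== SOURCE A (Python) =====
-- def longestvaluelist(R):
--     R = R*2
--     value_len = 1
--     current_len = 1
--
--     if R == []:
--         return []
--     else:
--         value = min(R)
--         for i in range(1,len(R)):
--
--             if R[i] == R[i-1]:
--                 current_value = R[i]
--                 current_len += 1
--                 if value_len < current_len:
--                     value_len = current_len
--                     value = current_value
--                 elif value_len == current_len and value > current_value:
--                     value = current_value
--             else:
--                 current_len = 1
--     if value_len == len(R):
--         value_len = len(R)/2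
--     R = [value]*int(value_len)
--     return R
-- ===== SOURCE B (Python) =====
-- def longestvaluelist(R):
--     R2 = R * 2
--     if not R2:
--         return []
--     runs = []
--     i = 0
--     while i < len(R2):
--         j = i
--         while j < len(R2) and R2[j] == R2[i]:
--             j += 1
--         runs.append((R2[i], j - i))
--         i = j
--     maxlen = max(n for _, n in runs)
--     value = min(v for v, n in runs if n == maxlen)
--     count = len(R2) // 2 if maxlen == len(R2) else maxlen
--     return [value] * count
-- ===== Notes on version B (the rewrite author's own statement) =====
-- stated objective: simpler
-- what changed: A's single stateful scan tracking (value_len, current_len, value) with an in-loop tie-break is replaced by a groupby-style decomposition of the doubled list into (value, run-length) pairs, followed by max over run lengths and min over the values of maximal runs.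
import Mathlib
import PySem

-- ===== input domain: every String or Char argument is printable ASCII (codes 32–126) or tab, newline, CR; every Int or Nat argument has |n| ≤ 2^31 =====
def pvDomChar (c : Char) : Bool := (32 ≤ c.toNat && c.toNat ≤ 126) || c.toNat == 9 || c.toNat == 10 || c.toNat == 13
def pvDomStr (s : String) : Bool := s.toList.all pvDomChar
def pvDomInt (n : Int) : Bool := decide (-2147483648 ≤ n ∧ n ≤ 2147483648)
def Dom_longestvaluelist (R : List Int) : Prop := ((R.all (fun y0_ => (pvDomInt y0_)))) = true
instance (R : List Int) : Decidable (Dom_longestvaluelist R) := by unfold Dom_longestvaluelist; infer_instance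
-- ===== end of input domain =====

-- B replaces A's stateful index scan by a groupby-style run decomposition (runs of equal values),
-- then takes the max run length and the min value among maximal runs (objective: simpler decomposition).


-- ===== PORT A =====
def pyLoopA : Int → List Int → Int → Int → Int → Int × Int
  | _, [], vl, _, v => (vl, v)
  | prev, x :: xs, vl, cl, v =>
    if x = prev then
      if vl < cl + 1 then pyLoopA x xs (cl + 1) (cl + 1) x
      else if vl = cl + 1 ∧ v > x then pyLoopA x xs vl (cl + 1) x
      else pyLoopA x xs vl (cl + 1) v
    else pyLoopA x xs vl 1 v

def longestvaluelist (R : List Int) : List Int :=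
  match R ++ R with
  | [] => []
  | h :: t =>
    let value := t.foldl min h
    let s := pyLoopA h t 1 1 value
    let len : Int := ((h :: t).length : Int)
    let vl := if s.1 = len then len / 2 else s.1
    List.replicate vl.toNat s.2

-- ===== PORT B =====
def runsOf : List Int → List (Int × Int)
  | [] => []
  | x :: xs =>
    (x, 1 + ((xs.takeWhile (· == x)).length : Int)) :: runsOf (xs.dropWhile (· == x))
termination_by l => l.length
decreasing_by
  have := List.length_dropWhile_le (fun y => y == x) xs
  simp only [List.length_cons]
  omega

def maxRunLen (runs : List (Int × Int)) : Int :=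
  match runs with
  | [] => 0
  | q :: qs => qs.foldl (fun a p => max a p.2) q.2

def longestvaluelist_alt (R : List Int) : List Int :=
  match R ++ R with
  | [] => []
  | h :: t =>
    let runs := runsOf (h :: t)
    let maxlen := maxRunLen runs
    match (runs.filter (fun p => p.2 == maxlen)).map Prod.fst with
    | [] => []
    | a :: as =>
      let value := as.foldl min a
      let len : Int := ((h :: t).length : Int)
      let count := if maxlen = len then len / 2 else maxlen
      List.replicate count.toNat value

-- ===== PRECONDITION & SPEC =====
def Spec_longestvaluelist (R : List Int) (out : List Int) : Prop := out = longestvaluelist_alt R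
instance (R : List Int) (out : List Int) : Decidable (Spec_longestvaluelist R out) := by unfold Spec_longestvaluelist; infer_instance

-- ===== CLAIM (what is proved, stated in full; the proofs are below) =====
def Claim_equal_longestvaluelist : Prop := ∀ (R : List Int), Dom_longestvaluelist R → Spec_longestvaluelist R (longestvaluelist R)

-- ===== LEMMAS AND PROOFS =====
theorem runsOf_nil : runsOf [] = [] := by rw [runsOf]

theorem runsOf_cons (x : Int) (xs : List Int) :
    runsOf (x :: xs) = (x, 1 + ((xs.takeWhile (· == x)).length : Int)) :: runsOf (xs.dropWhile (· == x)) := by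
  rw [runsOf]

def gstep (s q : Int × Int) : Int × Int :=
  if s.1 < q.2 then (q.2, q.1)
  else if s.1 = q.2 ∧ 2 ≤ q.2 then (s.1, min s.2 q.1)
  else s

theorem run_consume : ∀ (k : Nat) (p : Int) (xs : List Int) (vl cl v : Int), 1 ≤ cl → cl ≤ vl →
    pyLoopA p (List.replicate k p ++ xs) vl cl v =
    pyLoopA p xs (max vl (cl + k)) (cl + k)
      (if vl < cl + (k : Int) then p else if vl = cl + (k : Int) ∧ 1 ≤ (k : Int) then min v p else v) := by
  intro k
  induction k with
  | zero =>
    intro p xs vl cl v h1 h2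
    simp only [List.replicate_zero, List.nil_append, Nat.cast_zero, add_zero]
    rw [max_eq_left h2, if_neg (by omega), if_neg (by omega)]
  | succ k ih =>
    intro p xs vl cl v h1 h2
    have hcast : ((k + 1 : Nat) : Int) = (k : Int) + 1 := by push_cast; ring
    rw [List.replicate_succ, List.cons_append]
    simp only [pyLoopA, if_true, hcast]
    by_cases hlt : vl < cl + 1
    · rw [if_pos hlt, ih p xs (cl+1) (cl+1) p (by omega) (by omega)]
      have e0 : cl + 1 + (k:Int) = cl + ((k:Int)+1) := by ring
      rw [e0, max_eq_right (show (cl:Int)+1 ≤ cl + ((k:Int)+1) by omega),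
          max_eq_right (show vl ≤ cl + ((k:Int)+1) by omega),
          if_pos (show vl < cl + ((k:Int)+1) by omega)]
      congr 1
      split_ifs <;> simp
    · rw [if_neg hlt]
      by_cases heq : vl = cl + 1 ∧ v > p
      · rw [if_pos heq, ih p xs vl (cl+1) p (by omega) (by omega)]
        have e0 : cl + 1 + (k:Int) = cl + ((k:Int)+1) := by ring
        rw [e0]
        congr 1
        split_ifs <;>
          first
            | rfl
            | (exfalso; omega)
            | exact (min_eq_right (le_of_lt heq.2)).symm
      · rw [if_neg heq, ih p xs vl (cl+1) v (by omega) (by omega)]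
        have e0 : cl + 1 + (k:Int) = cl + ((k:Int)+1) := by ring
        rw [e0]
        have hvp : vl = cl + 1 → v ≤ p := by
          intro h; by_contra hc; exact heq ⟨h, by omega⟩
        congr 1
        split_ifs with c1 c2 c3 <;>
          first
            | rfl
            | (exfalso; omega)
            | exact (min_eq_left (by exact hvp (by omega))).symm

theorem dropWhile_head_not {p : Int → Bool} : ∀ (l : List Int) (y : Int) (ys : List Int),
    l.dropWhile p = y :: ys → p y = false := by
  intro l
  induction l with
  | nil => intro y ys h; simp [List.dropWhile] at h
  | cons x xs ih =>
    intro y ys h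
    rw [List.dropWhile_cons] at h
    by_cases hx : p x
    · rw [if_pos hx] at h; exact ih y ys h
    · rw [if_neg hx] at h
      cases h
      simpa using hx

theorem takeWhile_eq_replicate (x : Int) (xs : List Int) :
    xs.takeWhile (· == x) = List.replicate (xs.takeWhile (· == x)).length x := by
  apply List.eq_replicate_of_mem
  intro b hb
  have := List.mem_takeWhile_imp hb
  simpa using this

theorem loop_runs : ∀ (n : Nat) (l : List Int), l.length ≤ n → ∀ (p vl v : Int), 1 ≤ vl →
    pyLoopA p l vl 1 v = (runsOf (p :: l)).foldl gstep (vl, v) := by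
  intro n
  induction n with
  | zero =>
    intro l hl p vl v hvl
    have : l = [] := List.eq_nil_of_length_eq_zero (Nat.le_zero.mp hl)
    subst this
    rw [runsOf_cons]
    simp only [List.takeWhile_nil, List.length_nil, Nat.cast_zero, add_zero,
      List.dropWhile_nil, runsOf_nil, List.foldl_cons, List.foldl_nil, pyLoopA, gstep]
    rw [if_neg (by simp; omega), if_neg (by simp; try omega)]
  | succ n ih =>
    intro l hl p vl v hvl
    have hsplit : l = List.replicate (l.takeWhile (· == p)).length p ++ l.dropWhile (· == p) := by
      conv_lhs => rw [← List.takeWhile_append_dropWhile (p := (· == p)) (l := l)]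
      rw [← takeWhile_eq_replicate]
    set k := (l.takeWhile (· == p)).length with hk
    have hstep : pyLoopA p l vl 1 v =
        pyLoopA p (l.dropWhile (· == p)) (max vl (1 + k)) (1 + k)
          (if vl < 1 + (k:Int) then p else if vl = 1 + (k:Int) ∧ 1 ≤ (k:Int) then min v p else v) := by
      conv_lhs => rw [hsplit]
      exact run_consume k p _ vl 1 v le_rfl hvl
    have hg : gstep (vl, v) (p, 1 + (k:Int)) =
        (max vl (1 + k), if vl < 1 + (k:Int) then p else if vl = 1 + (k:Int) ∧ 1 ≤ (k:Int) then min v p else v) := by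
      simp only [gstep]
      by_cases c1 : vl < 1 + (k:Int)
      · rw [if_pos (by simpa using c1)]
        rw [max_eq_right (by omega), if_pos c1]
      · rw [if_neg (by simpa using c1), max_eq_left (by omega), if_neg c1]
        by_cases c2 : vl = 1 + (k:Int) ∧ 1 ≤ (k:Int)
        · rw [if_pos (by exact ⟨c2.1, by omega⟩), if_pos c2]
        · rw [if_neg (by intro hc; exact c2 ⟨hc.1, by omega⟩), if_neg c2]
    rw [hstep, runsOf_cons, ← hk, List.foldl_cons, hg]
    cases hdweq : l.dropWhile (· == p) with
    | nil =>
      rw [runsOf_nil]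
      rfl
    | cons y ys =>
      have hy : (y == p) = false := dropWhile_head_not l y ys hdweq
      have hyne : y ≠ p := by simpa using hy
      rw [pyLoopA, if_neg hyne]
      have hlen : ys.length ≤ n := by
        have h1 : (l.dropWhile (· == p)).length ≤ l.length := List.length_dropWhile_le _ _
        rw [hdweq] at h1
        simp only [List.length_cons] at h1
        omega
      exact ih ys hlen y (max vl (1+k)) _ (le_trans hvl (le_max_left _ _))

theorem foldl_min_min : ∀ (l : List Int) (a b : Int), l.foldl min (min a b) = min a (l.foldl min b) := by
  intro l
  induction l with
  | nil => intro a b; rfl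
  | cons c cs ih =>
    intro a b
    simp only [List.foldl_cons]
    rw [min_assoc, ih]

theorem foldl_min_replicate : ∀ (k : Nat) (a x : Int), (List.replicate k x).foldl min (min a x) = min a x := by
  intro k
  induction k with
  | zero => intro a x; rfl
  | succ k ih =>
    intro a x
    simp only [List.replicate_succ, List.foldl_cons]
    rw [min_assoc, min_self, ih]

theorem le_foldl_max : ∀ (l : List (Int × Int)) (a : Int), a ≤ l.foldl (fun x q => max x q.2) a := by
  intro l
  induction l with
  | nil => intro a; exact le_refl a
  | cons c cs ih =>
    intro a
    simp only [List.foldl_cons]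
    exact le_trans (le_max_left a c.2) (ih (max a c.2))

theorem mem_le_foldl_max : ∀ (l : List (Int × Int)) (a : Int) (p : Int × Int), p ∈ l → p.2 ≤ l.foldl (fun x q => max x q.2) a := by
  intro l
  induction l with
  | nil => intro a p hp; cases hp
  | cons c cs ih =>
    intro a p hp
    simp only [List.foldl_cons]
    rcases List.mem_cons.mp hp with h | h
    · subst h; exact le_trans (le_max_right a p.2) (le_foldl_max cs (max a p.2))
    · exact ih (max a c.2) p h

theorem foldl_max_attained : ∀ (l : List (Int × Int)) (a : Int),
    l.foldl (fun x q => max x q.2) a = a ∨ ∃ p ∈ l, p.2 = l.foldl (fun x q => max x q.2) a := by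
  intro l
  induction l with
  | nil => intro a; left; rfl
  | cons c cs ih =>
    intro a
    simp only [List.foldl_cons]
    rcases ih (max a c.2) with h | h
    · rcases max_cases a c.2 with ⟨he, _⟩ | ⟨he, _⟩
      · left; rw [h, he]
      · right; exact ⟨c, List.mem_cons_self .., by rw [h, he]⟩
    · rcases h with ⟨p, hp, he⟩
      right; exact ⟨p, List.mem_cons_of_mem _ hp, he⟩

theorem runsOf_len_pos : ∀ (n : Nat) (l : List Int), l.length ≤ n → ∀ q ∈ runsOf l, 1 ≤ q.2 := by
  intro n
  induction n with
  | zero =>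
    intro l hl q hq
    have : l = [] := List.eq_nil_of_length_eq_zero (Nat.le_zero.mp hl)
    subst this; rw [runsOf_nil] at hq; cases hq
  | succ n ih =>
    intro l hl q hq
    match l with
    | [] => rw [runsOf_nil] at hq; cases hq
    | x :: xs =>
      rw [runsOf_cons] at hq
      rcases List.mem_cons.mp hq with h | h
      · subst h
        show (1:Int) ≤ 1 + ((xs.takeWhile (· == x)).length : Int)
        omega
      · have hlen : (xs.dropWhile (· == x)).length ≤ n := by
          have := List.length_dropWhile_le (fun y => y == x) xs
          simp only [List.length_cons] at hl
          omega
        exact ih _ hlen q h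

theorem fold_g_char : ∀ (rs : List (Int × Int)) (vl v : Int), 1 ≤ vl →
    (rs.foldl gstep (vl, v)).1 = rs.foldl (fun a p => max a p.2) vl
  ∧ (rs.foldl gstep (vl, v)).2 =
      (if 2 ≤ rs.foldl (fun a p => max a p.2) vl then
         match (rs.filter (fun p => p.2 == rs.foldl (fun a p => max a p.2) vl)).map Prod.fst with
         | [] => v
         | a :: as => if vl = rs.foldl (fun a p => max a p.2) vl then min v (as.foldl min a) else as.foldl min a
       else v) := by
  intro rs
  induction rs with
  | nil =>
    intro vl v hvl
    constructor
    · rfl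
    · simp only [List.foldl_nil, List.filter_nil, List.map_nil]
      split_ifs <;> rfl
  | cons q rest ih =>
    intro vl v hvl
    obtain ⟨r, n⟩ := q
    simp only [List.foldl_cons, List.filter_cons]
    by_cases h1 : vl < n
    · -- run strictly longer than current best: state becomes (n, r)
      have hg : gstep (vl, v) (r, n) = (n, r) := by simp [gstep, h1]
      rw [hg]
      have hmax : max vl n = n := max_eq_right (le_of_lt h1)
      simp only [hmax]
      obtain ⟨ihf, ihs⟩ := ih n r (by omega)
      set M := rest.foldl (fun a p => max a p.2) n with hM
      have hnM : n ≤ M := le_foldl_max rest n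
      have h2M : 2 ≤ M := by omega
      refine ⟨ihf, ?_⟩
      rw [ihs, if_pos h2M, if_pos h2M]
      by_cases heq : n = M
      · have hbeq : (n == M) = true := by simpa using heq
        simp only [hbeq, if_true, List.map_cons]
        have hvlM : ¬ vl = M := by omega
        cases hatt : (rest.filter (fun p => p.2 == M)).map Prod.fst with
        | nil =>
          show r = (if vl = M then min v (List.foldl min r []) else List.foldl min r [])
          rw [if_neg hvlM]
          rfl
        | cons a as =>
          show (if n = M then min r (List.foldl min a as) else List.foldl min a as)
             = (if vl = M then min v (List.foldl min r (a :: as)) else List.foldl min r (a :: as))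
          rw [if_pos heq, if_neg hvlM, List.foldl_cons, foldl_min_min]
      · have hbeq : (n == M) = false := by simpa using heq
        simp only [hbeq, Bool.false_eq_true, if_false]
        rcases foldl_max_attained rest n with hc | hc
        · omega
        · rcases hc with ⟨p, hp, hpe⟩
          have hmem : p ∈ rest.filter (fun x => x.2 == M) := by
            rw [List.mem_filter]
            exact ⟨hp, by simpa using hpe⟩
          cases hatt : (rest.filter (fun x => x.2 == M)).map Prod.fst with
          | nil =>
            exfalso
            have := List.map_eq_nil_iff.mp hatt
            rw [this] at hmem
            cases hmem
          | cons a as =>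
            show (if n = M then min r (List.foldl min a as) else List.foldl min a as)
               = (if vl = M then min v (List.foldl min a as) else List.foldl min a as)
            rw [if_neg (by omega), if_neg (by omega)]
    · by_cases h2 : vl = n ∧ 2 ≤ n
      · -- run ties current best (length ≥ 2): value min-updated
        have hg : gstep (vl, v) (r, n) = (vl, min v r) := by simp [gstep, h2]
        rw [hg]
        have hmax : max vl n = vl := max_eq_left (by omega)
        simp only [hmax]
        obtain ⟨ihf, ihs⟩ := ih vl (min v r) hvl
        set M := rest.foldl (fun a p => max a p.2) vl with hM
        have hvlM : vl ≤ M := le_foldl_max rest vl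
        have h2M : 2 ≤ M := by omega
        refine ⟨ihf, ?_⟩
        rw [ihs, if_pos h2M, if_pos h2M]
        by_cases heq : vl = M
        · have hbeq : (n == M) = true := by simp; omega
          simp only [hbeq, if_true, List.map_cons]
          cases hatt : (rest.filter (fun p => p.2 == M)).map Prod.fst with
          | nil =>
            show min v r = (if vl = M then min v (List.foldl min r []) else List.foldl min r [])
            rw [if_pos heq]
            rfl
          | cons a as =>
            show (if vl = M then min (min v r) (List.foldl min a as) else List.foldl min a as)
               = (if vl = M then min v (List.foldl min r (a :: as)) else List.foldl min r (a :: as))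
            rw [if_pos heq, if_pos heq, List.foldl_cons, foldl_min_min, min_assoc]
        · have hne : n ≠ M := by omega
          have hbeq : (n == M) = false := by simpa using hne
          simp only [hbeq, Bool.false_eq_true, if_false]
          rcases foldl_max_attained rest vl with hc | hc
          · omega
          · rcases hc with ⟨p, hp, hpe⟩
            have hmem : p ∈ rest.filter (fun x => x.2 == M) := by
              rw [List.mem_filter]
              exact ⟨hp, by simpa using hpe⟩
            cases hatt : (rest.filter (fun x => x.2 == M)).map Prod.fst with
            | nil =>
              exfalso
              have := List.map_eq_nil_iff.mp hatt
              rw [this] at hmem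
              cases hmem
            | cons a as =>
              show (if vl = M then min (min v r) (List.foldl min a as) else List.foldl min a as)
                 = (if vl = M then min v (List.foldl min a as) else List.foldl min a as)
              rw [if_neg heq, if_neg heq]
      · -- run shorter (or a trivial tie of length 1): state unchanged
        have hg : gstep (vl, v) (r, n) = (vl, v) := by
          simp only [gstep]
          rw [if_neg (by simpa using h1), if_neg (by simpa using h2)]
        rw [hg]
        have hn : n ≤ vl := by omega
        have hmax : max vl n = vl := max_eq_left hn
        simp only [hmax]
        obtain ⟨ihf, ihs⟩ := ih vl v hvl
        set M := rest.foldl (fun a p => max a p.2) vl with hM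
        have hvlM : vl ≤ M := le_foldl_max rest vl
        refine ⟨ihf, ?_⟩
        rw [ihs]
        by_cases h2M : 2 ≤ M
        · rw [if_pos h2M, if_pos h2M]
          have hne : n ≠ M := by omega
          have hbeq : (n == M) = false := by simpa using hne
          simp only [hbeq, Bool.false_eq_true, if_false]
        · rw [if_neg h2M, if_neg h2M]

theorem runs_values_min : ∀ (n : Nat) (l : List Int), l.length ≤ n → ∀ (a : Int),
    ((runsOf l).map Prod.fst).foldl min a = l.foldl min a := by
  intro n
  induction n with
  | zero =>
    intro l hl a
    have : l = [] := List.eq_nil_of_length_eq_zero (Nat.le_zero.mp hl)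
    subst this; rw [runsOf_nil]; rfl
  | succ n ih =>
    intro l hl a
    match l with
    | [] => rw [runsOf_nil]; rfl
    | x :: xs =>
      rw [runsOf_cons]
      simp only [List.map_cons, List.foldl_cons]
      have hlen : (xs.dropWhile (· == x)).length ≤ n := by
        have := List.length_dropWhile_le (fun y => y == x) xs
        simp only [List.length_cons] at hl
        omega
      rw [ih _ hlen (min a x)]
      conv_rhs => rw [show xs = List.replicate (xs.takeWhile (· == x)).length x ++ xs.dropWhile (· == x) by
        conv_lhs => rw [← List.takeWhile_append_dropWhile (p := (· == x)) (l := xs)]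
        rw [← takeWhile_eq_replicate]]
      rw [List.foldl_append, foldl_min_replicate]

theorem final_eq : ∀ (R : List Int), longestvaluelist R = longestvaluelist_alt R := by
  intro R
  match R with
  | [] => rfl
  | r :: R' =>
    have hRR : (r :: R') ++ (r :: R') = r :: (R' ++ r :: R') := by simp
    set t := R' ++ r :: R' with ht
    rw [longestvaluelist, longestvaluelist_alt, hRR]
    simp only
    set k := (t.takeWhile (· == r)).length with hk
    set qs := runsOf (t.dropWhile (· == r)) with hqs
    set v0 := t.foldl min r with hv0
    set rs : List (Int × Int) := (r, 1 + (k:Int)) :: qs with hrs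
    have hrseq : runsOf (r :: t) = rs := by rw [runsOf_cons, ← hk, ← hqs]
    have hloop : pyLoopA r t 1 1 v0 = rs.foldl gstep (1, v0) := by
      rw [loop_runs t.length t le_rfl r 1 v0 le_rfl, hrseq]
    obtain ⟨hfst, hsnd⟩ := fold_g_char rs 1 v0 le_rfl
    set M := rs.foldl (fun a p => max a p.2) 1 with hM
    have hmaxlen : maxRunLen rs = M := by
      rw [hrs, maxRunLen, hM, List.foldl_cons]
      have h12 : max 1 ((r, 1 + (k:Int)).2) = (r, 1 + (k:Int)).2 :=
        max_eq_right (show (1:Int) ≤ (r, 1 + (k:Int)).2 by show (1:Int) ≤ 1 + (k:Int); omega)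
      rw [h12]
    rw [hloop, hfst, hsnd, hrseq, hmaxlen]
    have hM1 : 1 ≤ M := le_foldl_max rs 1
    by_cases h2M : 2 ≤ M
    · rw [if_pos h2M]
      rcases foldl_max_attained rs 1 with hc | hc
      · rw [← hM] at hc; omega
      · rw [← hM] at hc
        rcases hc with ⟨p, hp, hpe⟩
        have hmem : p ∈ rs.filter (fun x => x.2 == M) := by
          rw [List.mem_filter]
          exact ⟨hp, by simpa using hpe⟩
        cases hatt : (rs.filter (fun x => x.2 == M)).map Prod.fst with
        | nil =>
          exfalso
          have := List.map_eq_nil_iff.mp hatt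
          rw [this] at hmem
          cases hmem
        | cons a as =>
          show List.replicate (if M = (((r :: t).length : Nat) : Int) then (((r :: t).length : Nat) : Int) / 2 else M).toNat
                (if 1 = M then min v0 (List.foldl min a as) else List.foldl min a as)
             = List.replicate (if M = (((r :: t).length : Nat) : Int) then (((r :: t).length : Nat) : Int) / 2 else M).toNat
                (List.foldl min a as)
          rw [if_neg (show ¬(1 = M) by omega)]
    · rw [if_neg h2M]
      have hMeq : M = 1 := by omega
      have hall : ∀ q ∈ rs, q.2 = M := by
        intro q hq
        have hle : q.2 ≤ M := by rw [hM]; exact mem_le_foldl_max rs 1 q hq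
        have hge : 1 ≤ q.2 := by
          rw [← hrseq] at hq
          exact runsOf_len_pos (r :: t).length (r :: t) le_rfl q hq
        omega
      have hfil : rs.filter (fun x => x.2 == M) = rs := by
        apply List.filter_eq_self.mpr
        intro q hq
        simpa using hall q hq
      rw [hfil, hrs, List.map_cons]
      have hvals : ((runsOf (r :: t)).map Prod.fst).foldl min r = (r :: t).foldl min r := by
        exact runs_values_min (r :: t).length (r :: t) le_rfl r
      rw [hrseq, hrs, List.map_cons, List.foldl_cons, min_self] at hvals
      simp only [List.foldl_cons, min_self] at hvals
      show List.replicate (if M = (((r :: t).length : Nat) : Int) then (((r :: t).length : Nat) : Int) / 2 else M).toNat v0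
         = List.replicate (if M = (((r :: t).length : Nat) : Int) then (((r :: t).length : Nat) : Int) / 2 else M).toNat
            ((qs.map Prod.fst).foldl min r)
      rw [hvals]

-- ===== VERDICT (by name: the statement is the Claim_ definition above) =====
theorem longestvaluelist_spec : Claim_equal_longestvaluelist := by
  intro R _
  unfold Spec_longestvaluelist
  exact final_eq R
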